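-- pv_equiv track=rewrite | github.com/MihaiAC/algorithms-and-data-structures | practice/LC_Python/MaximumNumberOfOperations.py | maxOperations
-- ===== SOURCE A (Python) =====
-- def maxOperations(s: str) -> int:
--     ans = 0
--     curr_ones = 1 if s[0] == '1' else 0
--
--     for idx in range(1, len(s)):
--         if s[idx] == '1':
--             curr_ones += 1
--         elif s[idx-1] == '1':
--             ans += curr_ones
--
--     return ans
-- ===== SOURCE B (Python) =====
-- def maxOperations(s: str) -> int:
--     # Run-length decomposition: group s into (char, length) runs, then walk
--     # the runs keeping the cumulative count of '1's; add it whenever a run of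
--     # non-'1' chars immediately follows a '1' run.
--     runs = []
--     for ch in s:
--         if runs and runs[-1][0] == ch:
--             runs[-1] = (ch, runs[-1][1] + 1)
--         else:
--             runs.append((ch, 1))
--     ans = 0
--     ones = 0
--     prev = None
--     for ch, n in runs:
--         if ch == '1':
--             ones += n
--         elif prev == '1':
--             ans += ones
--         prev = ch
--     return ans
-- ===== Notes on version B (the rewrite author's own statement) =====
-- stated objective: idiomatic
-- what changed: B first decomposes the string into (char, run-length) groups and then walks the runs once (adding the cumulative ones-count per zero-run boundary), instead of A's index loop over characters with s[idx-1] lookbacks; B also returns 0 on the empty string where A raises.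
import Mathlib
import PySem

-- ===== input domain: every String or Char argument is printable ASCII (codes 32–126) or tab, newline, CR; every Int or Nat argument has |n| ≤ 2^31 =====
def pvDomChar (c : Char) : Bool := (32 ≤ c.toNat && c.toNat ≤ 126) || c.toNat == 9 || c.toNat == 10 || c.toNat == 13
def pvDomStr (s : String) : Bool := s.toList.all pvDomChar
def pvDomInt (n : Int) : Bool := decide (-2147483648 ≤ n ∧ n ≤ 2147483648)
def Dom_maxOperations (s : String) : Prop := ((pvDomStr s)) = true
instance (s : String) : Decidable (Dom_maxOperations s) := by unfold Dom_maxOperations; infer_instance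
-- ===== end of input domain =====

-- B decomposes the string into runs first and then walks the runs; A scans characters
-- with a look-back at the previous character. Equivalence is on the return value.

-- ===== PORT A =====
-- A's loop 'for idx in range(1, len(s))' reads s[idx] and s[idx-1]; ported as a
-- structural recursion carrying the previous character and A's state (curr_ones, ans).
def aGo (prev : Char) (currOnes ans : Int) : List Char → Int
  | [] => ans
  | c :: rest =>
      if c = '1' then aGo c (currOnes + 1) ans rest
      else if prev = '1' then aGo c currOnes (ans + currOnes) rest
      else aGo c currOnes ans rest

def maxOperations (s : String) : Int :=
  match s.toList with
  | [] => 0  -- Python raises IndexError at s[0] here; excluded by Pre_maxOperations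
  | c :: rest => aGo c (if c = '1' then 1 else 0) 0 rest

-- ===== PORT B =====
-- runs.append / merge-into-last of Source B's first loop
def addRun : List (Char × Int) → Char → List (Char × Int)
  | [], c => [(c, 1)]
  | [(c', n)], c => if c' = c then [(c', n + 1)] else [(c', n), (c, 1)]
  | r :: rs, c => r :: addRun rs c

-- Source B's second loop over the runs, carrying (prev, ones, ans)
def walkRuns (prev : Option Char) (ones ans : Int) : List (Char × Int) → Int
  | [] => ans
  | (c, n) :: rest =>
      if c = '1' then walkRuns (some c) (ones + n) ans rest
      else if prev = some '1' then walkRuns (some c) ones (ans + ones) rest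
      else walkRuns (some c) ones ans rest

def maxOperations_alt (s : String) : Int :=
  walkRuns none 0 0 (s.toList.foldl addRun [])

-- ===== PRECONDITION & SPEC =====
-- Pre_ excludes only the empty string, on which Python A raises IndexError at s[0].
def Pre_maxOperations (s : String) : Prop := s ≠ ""
instance (s : String) : Decidable (Pre_maxOperations s) := by unfold Pre_maxOperations; infer_instance
def pvWitness_maxOperations : String := "1100101"

def Spec_maxOperations (s : String) (out : Int) : Prop := out = maxOperations_alt s
instance (s : String) (out : Int) : Decidable (Spec_maxOperations s out) := by unfold Spec_maxOperations; infer_instance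

-- ===== CLAIM (what is proved, stated in full; the proofs are below) =====
def Claim_equal_maxOperations : Prop := ∀ (s : String), Dom_maxOperations s → Pre_maxOperations s → Spec_maxOperations s (maxOperations s)

-- ===== LEMMAS AND PROOFS =====

-- glue: concatenate two run lists, merging at the boundary when the chars agree
def glue : List (Char × Int) → List (Char × Int) → List (Char × Int)
  | [], ys => ys
  | [(c, n)], [] => [(c, n)]
  | [(c, n)], (c', m) :: ys => if c = c' then (c, n + m) :: ys else (c, n) :: (c', m) :: ys
  | x :: xs, ys => x :: glue xs ys

-- run decomposition built from the right
def groupR : List Char → List (Char × Int)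
  | [] => []
  | c :: cs => glue [(c, 1)] (groupR cs)

theorem glue_nil (xs : List (Char × Int)) : glue xs [] = xs := by
  induction xs with
  | nil => rfl
  | cons x xs ih =>
      cases xs with
      | nil => obtain ⟨c, n⟩ := x; rfl
      | cons y ys => simp [glue, ih]

theorem addRun_eq_glue (rs : List (Char × Int)) (c : Char) :
    addRun rs c = glue rs [(c, 1)] := by
  induction rs with
  | nil => rfl
  | cons r rs ih =>
      cases rs with
      | nil => obtain ⟨c', n⟩ := r; simp [addRun, glue]
      | cons y ys => simp [addRun, glue, ih]

theorem glue_assoc_single (a : List (Char × Int)) (c : Char) (n : Int)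
    (r : List (Char × Int)) : glue (glue a [(c, n)]) r = glue a (glue [(c, n)] r) := by
  induction a generalizing r with
  | nil => rfl
  | cons x xs ih =>
      obtain ⟨c', m⟩ := x
      cases xs with
      | nil =>
          cases r with
          | nil => by_cases h : c' = c <;> simp [glue, h, glue_nil]
          | cons y ys =>
              obtain ⟨c'', k⟩ := y
              by_cases h : c' = c
              · subst h
                by_cases h2 : c' = c''
                · subst h2; simp [glue, add_assoc]
                · simp [glue, h2]
              · by_cases h2 : c = c''
                · subst h2; simp [glue, h]
                · simp [glue, h, h2]
      | cons y ys =>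
          have hne : glue (y :: ys) [(c, n)] ≠ [] := by
            cases ys with
            | nil => obtain ⟨a1, a2⟩ := y; by_cases h : a1 = c <;> simp [glue, h]
            | cons z zs => simp [glue]
          have h1 : glue ((c', m) :: y :: ys) [(c, n)] = (c', m) :: glue (y :: ys) [(c, n)] := by
            simp [glue]
          rw [h1]
          have h2 : ∀ (zs ws : List (Char × Int)), zs ≠ [] →
              glue ((c', m) :: zs) ws = (c', m) :: glue zs ws := by
            intro zs ws hzs
            cases zs with
            | nil => exact absurd rfl hzs
            | cons z zzs => simp [glue]
          rw [h2 _ _ hne, ih, h2 _ _ (by simp)]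

theorem foldl_addRun_eq (cs : List Char) :
    ∀ acc, cs.foldl addRun acc = glue acc (groupR cs) := by
  induction cs with
  | nil => intro acc; simp [groupR, glue_nil]
  | cons c cs ih =>
      intro acc
      simp only [List.foldl_cons, groupR]
      rw [ih, addRun_eq_glue, glue_assoc_single]

theorem walk_glue (c : Char) (rs : List (Char × Int)) (p : Option Char) (ones ans : Int) :
    walkRuns p ones ans (glue [(c, 1)] rs) =
      (if c = '1' then walkRuns (some c) (ones + 1) ans rs
       else if p = some '1' then walkRuns (some c) ones (ans + ones) rs
       else walkRuns (some c) ones ans rs) := by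
  cases rs with
  | nil => by_cases h : c = '1' <;> simp [glue, walkRuns, h]
  | cons y ys =>
      obtain ⟨c', k⟩ := y
      by_cases h : c = c'
      · subst h
        by_cases h1 : c = '1' <;> simp [glue, walkRuns, h1, add_assoc]
      · have hg : glue [(c, 1)] ((c', k) :: ys) = (c, 1) :: (c', k) :: ys := by
          simp [glue, h]
        rw [hg]
        by_cases h1 : c = '1' <;> simp [walkRuns, h1]

theorem walk_groupR (cs : List Char) :
    ∀ (prev : Char) (ones ans : Int),
      walkRuns (some prev) ones ans (groupR cs) = aGo prev ones ans cs := by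
  induction cs with
  | nil => intro prev ones ans; rfl
  | cons c cs ih =>
      intro prev ones ans
      simp only [groupR, walk_glue, aGo]
      by_cases h : c = '1' <;> simp [h, ih]

-- ===== VERDICT (by name: the statement is the Claim_ definition above) =====
theorem maxOperations_spec : Claim_equal_maxOperations := by
  intro s _ hpre
  unfold Spec_maxOperations maxOperations maxOperations_alt
  rw [foldl_addRun_eq]
  cases hcs : s.toList with
  | nil =>
      exact absurd (by simpa using congrArg String.ofList hcs) hpre
  | cons c rest =>
      simp only [groupR, walk_glue, glue]
      by_cases h : c = '1' <;> simp [h, walk_groupR]
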